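-- pv_equiv track=rewrite | github.com/PolarisIO/Research-Model-Execution | main.py | workflow_instruction_chain
-- ===== SOURCE A (Python) =====
-- def workflow_instruction_chain(instruction_list:list, index: int, stop_instruction: str, stop_value: str) -> tuple[list, int]:
--     sub_workflow = []
--     sub_success = True
--     while index < len(instruction_list) and sub_success:
--         sub_item = instruction_list[index]
--         index += 1
--         if stop_instruction in sub_item.keys():
--             if sub_item[stop_instruction] == stop_value or len(stop_value) == 0:
--                 break
--             else:
--                 sub_workflow.append(sub_item)
--         else:
--             sub_workflow.append(sub_item)
--     return sub_workflow, index
-- ===== SOURCE B (Python) =====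
-- def workflow_instruction_chain(instruction_list: list, index: int, stop_instruction: str, stop_value: str) -> tuple[list, int]:
--     for j in range(index, len(instruction_list)):
--         item = instruction_list[j]
--         if stop_instruction in item and (item[stop_instruction] == stop_value or len(stop_value) == 0):
--             return instruction_list[index:j], j + 1
--     return instruction_list[index:], max(index, len(instruction_list))
-- ===== Notes on version B (the rewrite author's own statement) =====
-- stated objective: simpler
-- what changed: B first scans for the index j of the first stopping item and then returns the slice instruction_list[index:j] (or instruction_list[index:] with max(index,len) if none), instead of A's while-loop that mutates index and appends items one by one into an accumulator.
-- outside the precondition, e.g. on workflow_instruction_chain([{'a': 'x'}], -1, 'b', ''): A returns ([{'a': 'x'}, {'a': 'x'}], 1), B returns ([{'a': 'x'}], 1)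
import Mathlib
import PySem

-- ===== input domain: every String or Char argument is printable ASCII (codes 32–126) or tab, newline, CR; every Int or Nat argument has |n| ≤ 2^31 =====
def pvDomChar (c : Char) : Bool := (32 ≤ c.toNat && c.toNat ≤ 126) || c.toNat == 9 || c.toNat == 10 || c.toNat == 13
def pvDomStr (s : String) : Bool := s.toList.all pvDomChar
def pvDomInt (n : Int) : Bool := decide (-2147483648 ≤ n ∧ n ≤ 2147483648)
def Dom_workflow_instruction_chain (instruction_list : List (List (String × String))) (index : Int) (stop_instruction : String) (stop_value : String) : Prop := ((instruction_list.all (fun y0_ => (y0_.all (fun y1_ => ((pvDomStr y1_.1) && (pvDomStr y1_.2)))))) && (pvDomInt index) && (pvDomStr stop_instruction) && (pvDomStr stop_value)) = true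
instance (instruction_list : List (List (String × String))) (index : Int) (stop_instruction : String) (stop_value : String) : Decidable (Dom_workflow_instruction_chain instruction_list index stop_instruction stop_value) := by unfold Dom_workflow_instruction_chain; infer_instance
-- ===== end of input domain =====

-- B replaces A's mutating while-loop + accumulator with a scan for the first stopping
-- position followed by a single slice; no speed claim (objective: simpler).

-- ===== PORT A =====
-- the while-loop of A: state = (index, sub_workflow accumulator); 'break' returns
-- immediately; the fuel is the loop's iteration bound (len - index), so the recursion
-- is structural — at fuel 0 the guard index < len is already false.
def wicLoop (l : List (List (String × String))) (si sv : String) :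
    Nat → Int → List (List (String × String)) → (List (List (String × String))) × Int
  | 0, index, acc => (acc, index)
  | fuel + 1, index, acc =>
    if index < (l.length : Int) then
      match PySem.List.pyGet? l index with
      | none => (acc, index)  -- IndexError in Python (index < -len); excluded by Pre_
      | some sub_item =>
        match List.lookup si sub_item with  -- 'si in sub_item.keys()' + 'sub_item[si]' (first match)
        | some v =>
          if v = sv ∨ PySem.Str.len sv = 0 then (acc, index + 1)
          else wicLoop l si sv fuel (index + 1) (acc ++ [sub_item])
        | none => wicLoop l si sv fuel (index + 1) (acc ++ [sub_item])
    else (acc, index)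

def workflow_instruction_chain (instruction_list : List (List (String × String))) (index : Int) (stop_instruction : String) (stop_value : String) : (List (List (String × String))) × Int :=
  wicLoop instruction_list stop_instruction stop_value
    ((instruction_list.length : Int) - index).toNat index []

-- ===== PORT B =====
-- B's scan: first j ≥ index whose item stops the chain (fuel = remaining range length)
def wicFind (l : List (List (String × String))) (si sv : String) :
    Nat → Int → Option Int
  | 0, _ => none
  | fuel + 1, j =>
    if j < (l.length : Int) then
      match PySem.List.pyGet? l j with
      | none => none  -- IndexError in Python B (j < -len); excluded by Pre_
      | some item =>
        match List.lookup si item with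
        | some v => if v = sv ∨ PySem.Str.len sv = 0 then some j else wicFind l si sv fuel (j + 1)
        | none => wicFind l si sv fuel (j + 1)
    else none

def workflow_instruction_chain_alt (instruction_list : List (List (String × String))) (index : Int) (stop_instruction : String) (stop_value : String) : (List (List (String × String))) × Int :=
  match wicFind instruction_list stop_instruction stop_value
      ((instruction_list.length : Int) - index).toNat index with
  | some j => (PySem.List.slice instruction_list (some index) (some j), j + 1)
  | none => (PySem.List.slice instruction_list (some index) none,
             max index (instruction_list.length : Int))

-- ===== PRECONDITION & SPEC =====
-- Pre_ excludes negative index: for index < -len A raises IndexError, and for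
-- -len ≤ index < 0 A's value (it re-reads the tail of the list and then starts over at
-- position 0, duplicating items) is an accident of Python's negative-index wraparound
-- that no caller of a workflow chain would rely on.
def Pre_workflow_instruction_chain (instruction_list : List (List (String × String))) (index : Int) (stop_instruction : String) (stop_value : String) : Prop := 0 ≤ index
instance (instruction_list : List (List (String × String))) (index : Int) (stop_instruction : String) (stop_value : String) : Decidable (Pre_workflow_instruction_chain instruction_list index stop_instruction stop_value) := by unfold Pre_workflow_instruction_chain; infer_instance

def pvWitness_workflow_instruction_chain : (List (List (String × String))) × Int × String × String := ([[("a", "1")], [("b", "2")]], 0, "b", "2")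

def Spec_workflow_instruction_chain (instruction_list : List (List (String × String))) (index : Int) (stop_instruction : String) (stop_value : String) (out : (List (List (String × String))) × Int) : Prop := out = workflow_instruction_chain_alt instruction_list index stop_instruction stop_value
instance (instruction_list : List (List (String × String))) (index : Int) (stop_instruction : String) (stop_value : String) (out : (List (List (String × String))) × Int) : Decidable (Spec_workflow_instruction_chain instruction_list index stop_instruction stop_value out) := by unfold Spec_workflow_instruction_chain; infer_instance

-- ===== CLAIM (what is proved, stated in full; the proofs are below) =====
def Claim_equal_workflow_instruction_chain : Prop := ∀ (instruction_list : List (List (String × String))) (index : Int) (stop_instruction : String) (stop_value : String), Dom_workflow_instruction_chain instruction_list index stop_instruction stop_value → Pre_workflow_instruction_chain instruction_list index stop_instruction stop_value → Spec_workflow_instruction_chain instruction_list index stop_instruction stop_value (workflow_instruction_chain instruction_list index stop_instruction stop_value)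

-- ===== LEMMAS AND PROOFS =====

-- wicFind never answers a position before where it started
theorem wicFind_ge (l : List (List (String × String))) (si sv : String) :
    ∀ (fuel : Nat) (i j : Int), wicFind l si sv fuel i = some j → i ≤ j := by
  intro fuel
  induction fuel with
  | zero => intro i j h; cases h
  | succ fuel ih =>
    intro i j h
    rw [wicFind] at h
    by_cases hi : i < (l.length : Int)
    · rw [if_pos hi] at h
      cases hget : PySem.List.pyGet? l i with
      | none => rw [hget] at h; cases h
      | some item =>
        rw [hget] at h
        cases hlk : List.lookup si item with
        | none =>
          simp only [hlk] at h
          exact le_trans (by omega) (ih (i + 1) j h)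
        | some v =>
          simp only [hlk] at h
          by_cases hstop : v = sv ∨ PySem.Str.len sv = 0
          · rw [if_pos hstop] at h; cases h; exact le_refl _
          · rw [if_neg hstop] at h
            exact le_trans (by omega) (ih (i + 1) j h)
    · rw [if_neg hi] at h; cases h

-- slice l [i:j] peels its head at i (0 ≤ i < len, i < j)
theorem slice_cons_head (l : List (List (String × String))) (i : Int) (j? : Option Int)
    (item : List (String × String)) (h0 : 0 ≤ i) (hlen : i < (l.length : Int))
    (hget : PySem.List.pyGet? l i = some item)
    (hj : ∀ j, j? = some j → i < j) :
    PySem.List.slice l (some i) j? = item :: PySem.List.slice l (some (i + 1)) j? := by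
  have hget' : l[i.toNat]? = some item := by
    rw [PySem.List.pyGet?_of_nonneg l h0] at hget; exact hget
  have hlt : i.toNat < l.length := by omega
  have hdrop : l.drop i.toNat = item :: l.drop (i.toNat + 1) := by
    rw [List.drop_eq_getElem_cons hlt]
    simp only [List.getElem?_eq_getElem hlt] at hget'
    cases hget'; rfl
  cases j? with
  | none =>
    rw [PySem.List.slice_from l h0, PySem.List.slice_from l (by omega : (0:Int) ≤ i + 1)]
    rw [hdrop]
    have : (i + 1).toNat = i.toNat + 1 := by omega
    rw [this]
  | some j =>
    have hij : i < j := hj j rfl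
    rw [PySem.List.slice_toNat l h0 (by omega : (0:Int) ≤ j),
        PySem.List.slice_toNat l (by omega : (0:Int) ≤ i + 1) (by omega : (0:Int) ≤ j)]
    rw [hdrop]
    have ht : j.toNat - i.toNat = (j.toNat - (i + 1).toNat) + 1 := by omega
    rw [ht, List.take_succ_cons]
    have : (i + 1).toNat = i.toNat + 1 := by omega
    rw [this]

-- loop invariant: A's loop from position i with accumulator acc is acc ++ (B's slice)
theorem wicLoop_eq (l : List (List (String × String))) (si sv : String) :
    ∀ (fuel : Nat) (i : Int) (acc : List (List (String × String))), 0 ≤ i →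
      fuel = ((l.length : Int) - i).toNat →
      wicLoop l si sv fuel i acc =
        match wicFind l si sv fuel i with
        | some j => (acc ++ PySem.List.slice l (some i) (some j), j + 1)
        | none => (acc ++ PySem.List.slice l (some i) none, max i (l.length : Int)) := by
  intro fuel
  induction fuel with
  | zero =>
    intro i acc h0 hfuel
    have hi : (l.length : Int) ≤ i := by omega
    rw [wicLoop, wicFind]
    have : PySem.List.slice l (some i) none = [] := by
      rw [PySem.List.slice_from l h0]
      exact List.drop_eq_nil_of_le (by omega)
    simp only [this, List.append_nil]
    refine Prod.ext rfl ?_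
    simp; omega
  | succ fuel ih =>
    intro i acc h0 hfuel
    have hi : i < (l.length : Int) := by omega
    rw [wicLoop, wicFind]
    simp only [if_pos hi]
    cases hget : PySem.List.pyGet? l i with
    | none =>
      -- pyGet? = none is impossible for 0 ≤ i < len
      exfalso
      rw [PySem.List.pyGet?_eq_none_iff] at hget
      exact hget ⟨by omega, hi⟩
    | some item =>
      cases hlk : List.lookup si item with
      | some v =>
        simp only [hlk]
        by_cases hstop : v = sv ∨ PySem.Str.len sv = 0
        · rw [if_pos hstop, if_pos hstop]
          have : PySem.List.slice l (some i) (some i) = [] := by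
            rw [PySem.List.slice_toNat l h0 h0]; simp
          simp [this]
        · rw [if_neg hstop, if_neg hstop]
          rw [ih (i + 1) (acc ++ [item]) (by omega) (by omega)]
          cases hf : wicFind l si sv fuel (i + 1) with
          | some j =>
            have hij : i + 1 ≤ j := wicFind_ge l si sv fuel (i + 1) j hf
            simp [slice_cons_head l i (some j) item h0 hi hget
              (by intro j' hj'; cases hj'; omega)]
          | none =>
            rw [slice_cons_head l i none item h0 hi hget (by intro j' hj'; cases hj')]
            refine Prod.ext (by simp) (by simp; omega)
      | none =>
        simp only [hlk]
        rw [ih (i + 1) (acc ++ [item]) (by omega) (by omega)]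
        cases hf : wicFind l si sv fuel (i + 1) with
        | some j =>
          have hij : i + 1 ≤ j := wicFind_ge l si sv fuel (i + 1) j hf
          simp [slice_cons_head l i (some j) item h0 hi hget
            (by intro j' hj'; cases hj'; omega)]
        | none =>
          rw [slice_cons_head l i none item h0 hi hget (by intro j' hj'; cases hj')]
          refine Prod.ext (by simp) (by simp; omega)

-- ===== VERDICT (by name: the statement is the Claim_ definition above) =====
theorem workflow_instruction_chain_spec : Claim_equal_workflow_instruction_chain := by
  intro l index si sv _hdom hpre
  unfold Spec_workflow_instruction_chain workflow_instruction_chain workflow_instruction_chain_alt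
  rw [wicLoop_eq l si sv _ index [] hpre rfl]
  cases wicFind l si sv ((l.length : Int) - index).toNat index <;> simp
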